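-- pv_equiv track=rewrite | github.com/syhunt/KanaShift | src-python/phonoshift.py | count_tokens_simple
-- ===== SOURCE A (Python) =====
-- def is_token_sep(ch: str) -> bool:
--     return ch in (" ", "-", "'", ".", ",", "!", "?", ":", ";", "\t", "\n", "\r")
--
-- def count_tokens_simple(s: str) -> int:
--     count = 0
--     in_tok = False
--     for c in s:
--         if is_token_sep(c):
--             in_tok = False
--         elif not in_tok:
--             count += 1
--             in_tok = True
--     return count
-- ===== SOURCE B (Python) =====
-- _SEP = " -'.,!?:;\t\n\r"
-- _TABLE = str.maketrans(_SEP, " " * len(_SEP))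
--
-- def count_tokens_simple(s: str) -> int:
--     return len(s.translate(_TABLE).split())
-- ===== Notes on version B (the rewrite author's own statement) =====
-- stated objective: idiomatic
-- what changed: Replaced the stateful in_tok character loop with an idiomatic pipeline: translate the twelve separator characters to spaces via str.translate, then count the pieces of an argument-less str.split().
import Mathlib
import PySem

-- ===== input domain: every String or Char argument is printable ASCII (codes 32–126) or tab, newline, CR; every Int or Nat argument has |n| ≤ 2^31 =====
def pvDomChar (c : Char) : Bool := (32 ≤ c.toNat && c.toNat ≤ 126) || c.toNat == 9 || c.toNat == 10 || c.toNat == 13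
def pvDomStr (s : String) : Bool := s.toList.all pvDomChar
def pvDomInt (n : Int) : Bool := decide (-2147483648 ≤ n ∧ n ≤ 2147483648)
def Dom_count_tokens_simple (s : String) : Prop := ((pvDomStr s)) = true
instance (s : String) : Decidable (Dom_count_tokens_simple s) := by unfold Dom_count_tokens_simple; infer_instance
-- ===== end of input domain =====

-- B replaces A's stateful in_tok loop by a translate-separators-to-space then whitespace-split pipeline (idiomatic; same cost).


-- ===== PORT A =====
-- Python's `for c in s` yields length-1 strings; the helper is ported over Char.
def is_token_sep (ch : Char) : Bool :=
  ch ∈ [' ', '-', '\'', '.', ',', '!', '?', ':', ';', '\t', '\n', '\r']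

def count_tokens_simple (s : String) : Int :=
  (s.toList.foldl
    (fun (st : Int × Bool) c =>
      if is_token_sep c then (st.1, false)
      else if !st.2 then (st.1 + 1, true)
      else st)
    (0, false)).1

-- ===== PORT B =====
-- Source B's module-level constant _SEP (a string of the twelve separator characters)
def pvSep : List Char := [' ', '-', '\'', '.', ',', '!', '?', ':', ';', '\t', '\n', '\r']
-- s.translate(_TABLE): each separator char becomes ' ', every other char is kept
def pvTranslate (c : Char) : Char := if pvSep.contains c then ' ' else c

def count_tokens_simple_alt (s : String) : Int :=
  ((PySem.Str.split₀ (String.ofList (s.toList.map pvTranslate))).length : Int)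

-- ===== PRECONDITION & SPEC =====
def Spec_count_tokens_simple (s : String) (out : Int) : Prop := out = count_tokens_simple_alt s
instance (s : String) (out : Int) : Decidable (Spec_count_tokens_simple s out) := by unfold Spec_count_tokens_simple; infer_instance

-- ===== CLAIM (what is proved, stated in full; the proofs are below) =====
def Claim_equal_count_tokens_simple : Prop := ∀ (s : String), Dom_count_tokens_simple s → Spec_count_tokens_simple s (count_tokens_simple s)

-- ===== LEMMAS AND PROOFS =====

-- A's loop body, named so the induction can talk about it
def pvStep (st : Int × Bool) (c : Char) : Int × Bool :=
  if is_token_sep c then (st.1, false)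
  else if !st.2 then (st.1 + 1, true)
  else st

-- number of maximal non-separator runs of l, given whether we start inside a token
def pvRuns : List Char → Bool → Nat
  | [], _ => 0
  | c :: rest, tok =>
    if is_token_sep c then pvRuns rest false
    else if tok then pvRuns rest true
    else 1 + pvRuns rest true

lemma foldA_eq (l : List Char) : ∀ (k : Int) (tok : Bool),
    (l.foldl pvStep (k, tok)).1 = k + pvRuns l tok := by
  induction l with
  | nil => intro k tok; simp [pvRuns]
  | cons c rest ih =>
    intro k tok
    rw [List.foldl_cons]
    by_cases hs : is_token_sep c
    · rw [show pvStep (k, tok) c = (k, false) by simp [pvStep, hs], ih, pvRuns]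
      simp [hs]
    · cases tok with
      | false =>
        rw [show pvStep (k, false) c = (k + 1, true) by simp [pvStep, hs], ih, pvRuns]
        simp [hs]; omega
      | true =>
        rw [show pvStep (k, true) c = (k, true) by simp [pvStep, hs], ih, pvRuns]
        simp [hs]

lemma toNat_ne (c d : Char) (h : c ≠ d) : c.toNat ≠ d.toNat := fun hh =>
  h (Char.ext (UInt32.toNat_inj.mp hh))

lemma isspace_of_not_sep (c : Char) (hd : pvDomChar c = true)
    (hn : pvSep.contains c = false) : PySem.Chars.isspace c = false := by
  simp only [pvSep, List.contains, List.elem_eq_mem, List.mem_cons, List.not_mem_nil,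
    or_false, decide_eq_false_iff_not, not_or] at hn
  obtain ⟨h1, -, -, -, -, -, -, -, -, h10, h11, h12⟩ := hn
  have e1 := toNat_ne c ' ' h1
  have e2 := toNat_ne c '\t' h10
  have e3 := toNat_ne c '\n' h11
  have e4 := toNat_ne c '\r' h12
  simp only [show (' ').toNat = 32 from rfl, show ('\t').toNat = 9 from rfl,
    show ('\n').toNat = 10 from rfl, show ('\r').toNat = 13 from rfl] at e1 e2 e3 e4
  simp only [pvDomChar, Bool.or_eq_true, Bool.and_eq_true, decide_eq_true_eq, beq_iff_eq] at hd
  simp [PySem.Chars.isspace]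
  omega

lemma sep_iff_contains (c : Char) : is_token_sep c = pvSep.contains c := by
  simp only [is_token_sep, pvSep, List.contains, List.elem_eq_mem]

lemma go_length (l : List Char) : ∀ (cur : List Char) (acc : List (List Char)),
    l.all pvDomChar = true →
    (PySem.Chars.split₀.go (l.map pvTranslate) cur acc).length
      = acc.length + (if cur.isEmpty then 0 else 1) + pvRuns l (!cur.isEmpty) := by
  induction l with
  | nil =>
    intro cur acc _
    simp only [List.map_nil, PySem.Chars.split₀.go, pvRuns]
    by_cases h : cur.isEmpty <;> simp [h]
  | cons c rest ih =>
    intro cur acc hall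
    simp only [List.all_cons, Bool.and_eq_true] at hall
    obtain ⟨hc, hrest⟩ := hall
    simp only [List.map_cons, PySem.Chars.split₀.go, pvTranslate, pvRuns, sep_iff_contains]
    by_cases hs : pvSep.contains c
    · have hsp : PySem.Chars.isspace ' ' = true := by decide
      simp only [hs, if_true, hsp]
      by_cases hcur : cur.isEmpty
      · simpa [hcur] using ih [] acc hrest
      · simpa [hcur] using ih [] (cur.reverse :: acc) hrest
    · have hns : PySem.Chars.isspace c = false :=
        isspace_of_not_sep c hc (by simpa using hs)
      simp only [hs, if_false, hns, Bool.false_eq_true, if_false]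
      have h2 := ih (c :: cur) acc hrest
      simp only [List.isEmpty_cons, Bool.not_false] at h2
      rw [h2]
      by_cases hcur : cur.isEmpty <;> (simp [hcur]; try omega)

lemma split₀_len (s : String) :
    (PySem.Str.split₀ s).length = (PySem.Chars.split₀ s.toList).length := by
  conv_rhs => rw [← PySem.Str.split₀_map_toList]
  rw [List.length_map]

-- ===== VERDICT (by name: the statement is the Claim_ definition above) =====
theorem count_tokens_simple_spec : Claim_equal_count_tokens_simple := by
  intro s hdom
  unfold Spec_count_tokens_simple count_tokens_simple count_tokens_simple_alt
  rw [show (fun (st : Int × Bool) c =>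
      if is_token_sep c then (st.1, false)
      else if !st.2 then (st.1 + 1, true)
      else st) = pvStep from rfl, foldA_eq, split₀_len, String.toList_ofList]
  unfold PySem.Chars.split₀
  rw [go_length s.toList [] [] hdom]
  simp
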